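-- pv_equiv track=rewrite | github.com/Salih964/python-works | task5/sortchar.py | sort_string_symbols_digits
-- ===== SOURCE A (Python) =====
-- def sort_string_symbols_digits(string):
--
--   symbols = []
--   digits = []
--   for char in string:
--     if char.isalpha():
--       symbols.append(char)
--     elif char.isdigit():
--       digits.append(char)
--   return "".join(symbols) + "".join(digits)
-- ===== SOURCE B (Python) =====
-- def sort_string_symbols_digits(string):
--   kept = [c for c in string if c.isalpha() or c.isdigit()]
--   return "".join(sorted(kept, key=lambda c: 0 if c.isalpha() else 1))
-- ===== Notes on version B (the rewrite author's own statement) =====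
-- stated objective: alternative
-- what changed: Replaces the explicit two-bucket partitioning loop with a filter of the alphanumeric characters followed by a stable sort keyed 0 for letters and 1 for digits.
import Mathlib
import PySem

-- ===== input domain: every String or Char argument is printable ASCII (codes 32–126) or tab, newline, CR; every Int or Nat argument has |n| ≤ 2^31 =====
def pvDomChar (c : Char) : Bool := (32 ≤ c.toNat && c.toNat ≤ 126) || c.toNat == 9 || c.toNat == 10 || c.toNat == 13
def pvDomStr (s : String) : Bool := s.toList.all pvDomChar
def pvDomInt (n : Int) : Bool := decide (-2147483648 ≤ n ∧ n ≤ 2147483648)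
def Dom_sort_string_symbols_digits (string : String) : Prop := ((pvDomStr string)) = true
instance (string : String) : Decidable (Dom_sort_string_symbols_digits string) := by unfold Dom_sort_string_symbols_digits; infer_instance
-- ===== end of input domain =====

-- B replaces A's two-bucket partitioning loop with a filter of the alphanumeric
-- characters followed by a stable sort keyed 0 for letters, 1 for digits (alternative decomposition).

-- ===== PORT A =====
-- loop: for char in string: append to symbols if isalpha, elif isdigit append to digits
def sort_string_symbols_digits (string : String) : String :=
  let acc := string.toList.foldl
    (fun (acc : List Char × List Char) c =>
      if PySem.Chars.isalpha c then (acc.1 ++ [c], acc.2)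
      else if PySem.Chars.isdigit c then (acc.1, acc.2 ++ [c])
      else acc) ([], [])
  -- "".join(symbols) + "".join(digits): both buckets hold single characters
  String.mk (acc.1 ++ acc.2)

-- ===== PORT B =====
def sort_string_symbols_digits_alt (string : String) : String :=
  let kept := string.toList.filter (fun c => PySem.Chars.isalpha c || PySem.Chars.isdigit c)
  String.mk (PySem.List.sorted kept (fun c => if PySem.Chars.isalpha c then (0 : Int) else 1))

-- ===== PRECONDITION & SPEC =====
def Spec_sort_string_symbols_digits (string : String) (out : String) : Prop := out = sort_string_symbols_digits_alt string
instance (string : String) (out : String) : Decidable (Spec_sort_string_symbols_digits string out) := by unfold Spec_sort_string_symbols_digits; infer_instance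

-- ===== CLAIM (what is proved, stated in full; the proofs are below) =====
def Claim_equal_sort_string_symbols_digits : Prop := ∀ (string : String), Dom_sort_string_symbols_digits string → Spec_sort_string_symbols_digits string (sort_string_symbols_digits string)

-- ===== LEMMAS AND PROOFS =====

-- the binary sort key used by B
def pvKey (c : Char) : Int := if PySem.Chars.isalpha c then 0 else 1

-- inserting past a prefix of elements x does not go before
lemma insertBy_append (before : Char → Char → Bool) (x : Char) (A B : List Char)
    (h : ∀ y ∈ A, before x y = false) :
    PySem.List.insertBy before x (A ++ B) = A ++ PySem.List.insertBy before x B := by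
  induction A with
  | nil => simp
  | cons a A ih =>
    have ha : before x a = false := h a (by simp)
    simp only [List.cons_append, PySem.List.insertBy, ha, Bool.false_eq_true, if_false]
    rw [ih (fun y hy => h y (by simp [hy]))]

-- inserting an element that goes before nothing appends it at the end
lemma insertBy_all_false (before : Char → Char → Bool) (x : Char) (L : List Char)
    (h : ∀ y ∈ L, before x y = false) :
    PySem.List.insertBy before x L = L ++ [x] := by
  induction L with
  | nil => rfl
  | cons a L ih =>
    have ha : before x a = false := h a (by simp)
    simp only [PySem.List.insertBy, ha, Bool.false_eq_true, if_false, List.cons_append]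
    rw [ih (fun y hy => h y (by simp [hy]))]

-- characterisation of the stable sort under the binary key:
-- key-0 elements first, key-1 elements after, each block in source order
lemma sorted_binary (xs : List Char) :
    PySem.List.sorted xs pvKey =
      xs.filter (fun c => PySem.Chars.isalpha c) ++ xs.filter (fun c => !PySem.Chars.isalpha c) := by
  rw [PySem.List.sorted_eq_foldl_insertBy]
  induction xs using List.reverseRecOn with
  | nil => simp
  | append_singleton xs x ih =>
    rw [List.foldl_append, List.foldl_cons, List.foldl_nil, ih]
    by_cases hx : PySem.Chars.isalpha x = true
    · -- key x = 0: inserted at the end of the letter block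
      have h0 : ∀ y ∈ xs.filter (fun c => PySem.Chars.isalpha c),
          (decide (pvKey x < pvKey y)) = false := by
        intro y hy
        have := List.of_mem_filter hy
        simp [pvKey, hx, this]
      rw [insertBy_append _ _ _ _ h0]
      have h1 : PySem.List.insertBy (fun a b => decide (pvKey a < pvKey b)) x
          (xs.filter (fun c => !PySem.Chars.isalpha c)) =
          x :: xs.filter (fun c => !PySem.Chars.isalpha c) := by
        cases hys : xs.filter (fun c => !PySem.Chars.isalpha c) with
        | nil => simp [PySem.List.insertBy]
        | cons y ys =>
          have hy : (!PySem.Chars.isalpha y) = true := by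
            have := List.of_mem_filter (p := fun c => !PySem.Chars.isalpha c)
              (a := y) (l := xs) (by rw [hys]; simp)
            exact this
          simp only [PySem.List.insertBy]
          simp [pvKey, hx, Bool.not_eq_true' .. ▸ hy]
      rw [h1]
      simp [List.filter_append, hx]
    · -- key x = 1: appended at the very end
      have h0 : ∀ y ∈ xs.filter (fun c => PySem.Chars.isalpha c) ++
          xs.filter (fun c => !PySem.Chars.isalpha c),
          (decide (pvKey x < pvKey y)) = false := by
        intro y _
        by_cases hy : PySem.Chars.isalpha y = true <;> simp [pvKey, hx, hy]
      rw [insertBy_all_false _ _ _ h0]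
      simp [List.filter_append, hx, List.append_assoc]

-- A's loop computes the two filters, prefixed by the accumulators
lemma loopA (xs : List Char) (s d : List Char) :
    xs.foldl
      (fun (acc : List Char × List Char) c =>
        if PySem.Chars.isalpha c then (acc.1 ++ [c], acc.2)
        else if PySem.Chars.isdigit c then (acc.1, acc.2 ++ [c])
        else acc) (s, d) =
      (s ++ xs.filter (fun c => PySem.Chars.isalpha c),
       d ++ xs.filter (fun c => !PySem.Chars.isalpha c && PySem.Chars.isdigit c)) := by
  induction xs generalizing s d with
  | nil => simp
  | cons c xs ih =>
    by_cases hc : PySem.Chars.isalpha c = true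
    · simp [List.foldl_cons, hc, ih]
    · by_cases hd : PySem.Chars.isdigit c = true <;>
        simp [List.foldl_cons, hc, hd, ih]

-- B's two blocks, rewritten as filters of the whole string
lemma filters_of_kept (xs : List Char) :
    (xs.filter (fun c => PySem.Chars.isalpha c || PySem.Chars.isdigit c)).filter
        (fun c => PySem.Chars.isalpha c) = xs.filter (fun c => PySem.Chars.isalpha c) ∧
    (xs.filter (fun c => PySem.Chars.isalpha c || PySem.Chars.isdigit c)).filter
        (fun c => !PySem.Chars.isalpha c) =
      xs.filter (fun c => !PySem.Chars.isalpha c && PySem.Chars.isdigit c) := by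
  constructor <;>
  · rw [List.filter_filter]
    apply List.filter_congr
    intro c _
    by_cases h1 : PySem.Chars.isalpha c = true <;>
      by_cases h2 : PySem.Chars.isdigit c = true <;> simp [h1, h2]

-- ===== VERDICT (by name: the statement is the Claim_ definition above) =====
theorem sort_string_symbols_digits_spec : Claim_equal_sort_string_symbols_digits := by
  intro s _
  show sort_string_symbols_digits s = sort_string_symbols_digits_alt s
  show String.mk (((s.toList.foldl
      (fun (acc : List Char × List Char) c =>
        if PySem.Chars.isalpha c then (acc.1 ++ [c], acc.2)
        else if PySem.Chars.isdigit c then (acc.1, acc.2 ++ [c])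
        else acc) ([], []))).1 ++ ((s.toList.foldl
      (fun (acc : List Char × List Char) c =>
        if PySem.Chars.isalpha c then (acc.1 ++ [c], acc.2)
        else if PySem.Chars.isdigit c then (acc.1, acc.2 ++ [c])
        else acc) ([], []))).2) =
    String.mk (PySem.List.sorted (s.toList.filter
      (fun c => PySem.Chars.isalpha c || PySem.Chars.isdigit c))
      (fun c => if PySem.Chars.isalpha c then (0 : Int) else 1))
  have hb := sorted_binary (s.toList.filter
    (fun c => PySem.Chars.isalpha c || PySem.Chars.isdigit c))
  have hk : (fun c => if PySem.Chars.isalpha c then (0 : Int) else 1) = pvKey := rfl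
  rw [hk, hb, loopA, (filters_of_kept s.toList).1, (filters_of_kept s.toList).2]
  simp
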